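-- pv_equiv track=rewrite | github.com/cirosantilli/project-euler-solvers | solvers/100.py | blue_red_for_total_limit
-- ===== SOURCE A (Python) =====
-- from typing import Tuple
--
-- def next_solution(u: int, v: int) -> Tuple[int, int]:
--     """
--     Given (u, v) solving u^2 - 2*v^2 = -1, generate the next larger solution.
--     Uses multiplication by (3 + 2*sqrt(2)).
--     """
--     return 3 * u + 4 * v, 2 * u + 3 * v
--
-- def blue_red_for_total_limit(limit_n: int) -> Tuple[int, int, int]:
--     """
--     Find the first arrangement with total discs n > limit_n such that:
--         P(two blue) = b/n * (b-1)/(n-1) = 1/2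
--     Returns (b, r, n).
--     """
--     # Use u = 2n - 1, v = 2b - 1, then u^2 - 2*v^2 = -1.
--     u, v = 1, 1  # corresponds to (n, b) = (1, 1), a valid Pell seed
--
--     while True:
--         n = (u + 1) // 2
--         b = (v + 1) // 2
--         if n > limit_n:
--             r = n - b
--             return b, r, n
--         u, v = next_solution(u, v)
-- ===== SOURCE B (Python) =====
-- def _compose(u, v, p, q):
--     # Brahmagupta composition: combines a solution of x^2-2y^2=-1 with a
--     # solution of x^2-2y^2=1, yielding a solution of x^2-2y^2=-1.
--     return u * p + 2 * v * q, u * q + v * p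
--
--
-- def blue_red_for_total_limit(limit_n: int):
--     """
--     Find the first arrangement with total discs n > limit_n such that
--     P(two blue) = 1/2.  Returns (b, r, n).
--
--     Binary lifting: build jumps (3,2)^(2^i) by repeated squaring until one
--     jump from the seed overshoots, greedily compose the largest jumps that
--     stay below the target, then take one final unit step.
--     """
--     target = 2 * limit_n + 1          # need u >= target, where u = 2n - 1
--     u, v = 1, 1                       # seed solution, (n, b) = (1, 1)
--     if u < target:
--         jumps = [(3, 2)]              # (3,2)^(2^0), squared repeatedly
--         while _compose(u, v, *jumps[-1])[0] < target:
--             p, q = jumps[-1]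
--             jumps.append((p * p + 2 * q * q, 2 * p * q))
--         for p, q in reversed(jumps[:-1]):
--             nu, nv = _compose(u, v, p, q)
--             if nu < target:
--                 u, v = nu, nv
--         u, v = _compose(u, v, 3, 2)
--     n = (u + 1) // 2
--     b = (v + 1) // 2
--     return b, n - b, n
-- ===== Notes on version B (the rewrite author's own statement) =====
-- stated objective: alternative
-- what changed: B finds the first Pell solution past the limit by binary lifting: it builds jumps (3,2)^(2^i) by repeated squaring, greedily advances with the largest Brahmagupta-composed jumps that stay below the target, then takes one unit step, instead of A's one-solution-at-a-time iteration.
import Mathlib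
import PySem

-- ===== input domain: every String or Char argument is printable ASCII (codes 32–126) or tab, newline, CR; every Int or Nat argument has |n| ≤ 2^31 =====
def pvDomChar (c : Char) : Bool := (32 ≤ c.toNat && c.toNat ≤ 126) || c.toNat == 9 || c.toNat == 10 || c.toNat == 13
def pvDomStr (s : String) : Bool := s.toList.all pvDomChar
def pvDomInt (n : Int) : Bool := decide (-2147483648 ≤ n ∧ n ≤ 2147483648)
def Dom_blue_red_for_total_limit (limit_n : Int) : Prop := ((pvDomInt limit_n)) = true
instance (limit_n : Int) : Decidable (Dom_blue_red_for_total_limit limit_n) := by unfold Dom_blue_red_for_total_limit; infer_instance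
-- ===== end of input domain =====

-- B replaces A's one-step-at-a-time Pell iteration by binary lifting: it squares
-- the fundamental solution (3,2) and advances by Brahmagupta-composed jumps
-- (objective: alternative).

-- ===== PORT A =====
def next_solution (u v : Int) : Int × Int := (3 * u + 4 * v, 2 * u + 3 * v)

-- A's 'while True' ported with a fuel counter; fuel 20 never runs out on the
-- stated domain |limit_n| ≤ 2^31 (the n-sequence exceeds 2^31 within 13 steps).
def pvALoop (limit_n : Int) : Nat → Int × Int → Int × Int × Int
  | 0, (u, v) =>
      let n := PySem.Int.floordiv (u + 1) 2
      let b := PySem.Int.floordiv (v + 1) 2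
      (b, n - b, n)
  | f + 1, (u, v) =>
      let n := PySem.Int.floordiv (u + 1) 2
      let b := PySem.Int.floordiv (v + 1) 2
      if n > limit_n then (b, n - b, n)
      else pvALoop limit_n f (next_solution u v)

def blue_red_for_total_limit (limit_n : Int) : Int × Int × Int :=
  pvALoop limit_n 20 (1, 1)

-- ===== PORT B =====
def pvCompose (u v p q : Int) : Int × Int := (u * p + 2 * v * q, u * q + v * p)

-- B's jump-building 'while' loop, ported with a fuel counter; fuel 8 never runs
-- out on the stated domain (at most 4 squarings reach the target).
def pvBuildJumps (target u v : Int) : Nat → List (Int × Int) → List (Int × Int)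
  | 0, js => js
  | f + 1, js =>
      match js.getLast? with
      | none => js   -- unreachable: the list starts non-empty and only grows
      | some (p, q) =>
          if (pvCompose u v p q).1 < target then
            pvBuildJumps target u v f (js ++ [(p * p + 2 * q * q, 2 * p * q)])
          else js

def pvLift (target : Int) (s : Int × Int) (pq : Int × Int) : Int × Int :=
  let nuv := pvCompose s.1 s.2 pq.1 pq.2
  if nuv.1 < target then nuv else s

def blue_red_for_total_limit_alt (limit_n : Int) : Int × Int × Int :=
  let target := 2 * limit_n + 1
  let s : Int × Int :=
    if (1 : Int) < target then
      let jumps := pvBuildJumps target 1 1 8 [(3, 2)]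
      let s := ((jumps.dropLast).reverse).foldl (pvLift target) (1, 1)
      pvCompose s.1 s.2 3 2
    else (1, 1)
  let n := PySem.Int.floordiv (s.1 + 1) 2
  let b := PySem.Int.floordiv (s.2 + 1) 2
  (b, n - b, n)

-- ===== PRECONDITION & SPEC =====
def Spec_blue_red_for_total_limit (limit_n : Int) (out : Int × Int × Int) : Prop := out = blue_red_for_total_limit_alt limit_n
instance (limit_n : Int) (out : Int × Int × Int) : Decidable (Spec_blue_red_for_total_limit limit_n out) := by unfold Spec_blue_red_for_total_limit; infer_instance

-- ===== CLAIM (what is proved, stated in full; the proofs are below) =====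
def Claim_equal_blue_red_for_total_limit : Prop := ∀ (limit_n : Int), Dom_blue_red_for_total_limit limit_n → Spec_blue_red_for_total_limit limit_n (blue_red_for_total_limit limit_n)

-- ===== LEMMAS AND PROOFS =====

-- single-step evaluation lemmas for A's loop
theorem stepA (L : Int) (f : Nat) (u v n u' v' : Int)
    (hn : PySem.Int.floordiv (u + 1) 2 = n) (h : ¬(n > L))
    (hs : next_solution u v = (u', v')) :
    pvALoop L (f + 1) (u, v) = pvALoop L f (u', v') := by
  simp only [pvALoop, hn, h, if_false, hs]

theorem stopA (L : Int) (f : Nat) (u v n b : Int)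
    (hn : PySem.Int.floordiv (u + 1) 2 = n) (hb : PySem.Int.floordiv (v + 1) 2 = b)
    (h : n > L) :
    pvALoop L (f + 1) (u, v) = (b, n - b, n) := by
  simp only [pvALoop, hn, hb, h, if_true]

-- single-step evaluation lemmas for B's jump building and lifting
theorem buildStep (t u v : Int) (f : Nat) (js js' : List (Int × Int)) (p q c : Int)
    (hl : js.getLast? = some (p, q)) (hc : (pvCompose u v p q).1 = c) (h : c < t)
    (hj : js ++ [(p * p + 2 * q * q, 2 * p * q)] = js') :
    pvBuildJumps t u v (f + 1) js = pvBuildJumps t u v f js' := by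
  simp only [pvBuildJumps, hl, hc, h, if_true, hj]

theorem buildStop (t u v : Int) (f : Nat) (js : List (Int × Int)) (p q c : Int)
    (hl : js.getLast? = some (p, q)) (hc : (pvCompose u v p q).1 = c) (h : ¬(c < t)) :
    pvBuildJumps t u v (f + 1) js = js := by
  simp only [pvBuildJumps, hl, hc, h, if_false]

theorem liftTake (t : Int) (s pq r : Int × Int) (c : Int)
    (hc : pvCompose s.1 s.2 pq.1 pq.2 = r) (h1 : r.1 = c) (h : c < t) :
    pvLift t s pq = r := by
  simp only [pvLift, hc, h1, h, if_true]

theorem liftSkip (t : Int) (s pq : Int × Int) (c : Int)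
    (hc : (pvCompose s.1 s.2 pq.1 pq.2).1 = c) (h : ¬(c < t)) :
    pvLift t s pq = s := by
  simp only [pvLift, hc, h, if_false]

-- per-interval evaluations of both ports (the breakpoints are the n-sequence)
theorem pvA_0 (L : Int) (h2 : L ≤ 0) :
    blue_red_for_total_limit L = (1, 0, 1) := by
  unfold blue_red_for_total_limit
  rw [stopA L 19 1 1 1 1 (by decide) (by decide) (by omega)]
  norm_num

theorem pvB_0 (L : Int) (h2 : L ≤ 0) :
    blue_red_for_total_limit_alt L = (1, 0, 1) := by
  unfold blue_red_for_total_limit_alt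
  simp only []
  rw [if_neg (by omega)]
  decide

theorem pvA_1 (L : Int) (h1 : 1 ≤ L) (h2 : L ≤ 3) :
    blue_red_for_total_limit L = (3, 1, 4) := by
  unfold blue_red_for_total_limit
  rw [stepA L 19 1 1 1 7 5 (by decide) (by omega) (by decide)]
  rw [stopA L 18 7 5 4 3 (by decide) (by decide) (by omega)]
  norm_num

theorem pvB_1 (L : Int) (h1 : 1 ≤ L) (h2 : L ≤ 3) :
    blue_red_for_total_limit_alt L = (3, 1, 4) := by
  unfold blue_red_for_total_limit_alt
  simp only []
  rw [if_pos (by omega)]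
  rw [buildStop (2 * L + 1) 1 1 7 [(3, 2)] 3 2 7 (by decide) (by decide) (by omega)]
  rw [show ([(3, 2)] : List (Int × Int)).dropLast.reverse = [] from by decide]
  rw [List.foldl_nil]
  decide

theorem pvA_2 (L : Int) (h1 : 4 ≤ L) (h2 : L ≤ 20) :
    blue_red_for_total_limit L = (15, 6, 21) := by
  unfold blue_red_for_total_limit
  rw [stepA L 19 1 1 1 7 5 (by decide) (by omega) (by decide)]
  rw [stepA L 18 7 5 4 41 29 (by decide) (by omega) (by decide)]
  rw [stopA L 17 41 29 21 15 (by decide) (by decide) (by omega)]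
  norm_num

theorem pvB_2 (L : Int) (h1 : 4 ≤ L) (h2 : L ≤ 20) :
    blue_red_for_total_limit_alt L = (15, 6, 21) := by
  unfold blue_red_for_total_limit_alt
  simp only []
  rw [if_pos (by omega)]
  rw [buildStep (2 * L + 1) 1 1 7 [(3, 2)] [(3, 2), (17, 12)] 3 2 7 (by decide) (by decide) (by omega) (by decide)]
  rw [buildStop (2 * L + 1) 1 1 6 [(3, 2), (17, 12)] 17 12 41 (by decide) (by decide) (by omega)]
  rw [show ([(3, 2), (17, 12)] : List (Int × Int)).dropLast.reverse = [(3, 2)] from by decide]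
  rw [List.foldl_cons]
  rw [liftTake (2 * L + 1) (1, 1) (3, 2) (7, 5) 7 (by decide) (by decide) (by omega)]
  rw [List.foldl_nil]
  decide

theorem pvA_3 (L : Int) (h1 : 21 ≤ L) (h2 : L ≤ 119) :
    blue_red_for_total_limit L = (85, 35, 120) := by
  unfold blue_red_for_total_limit
  rw [stepA L 19 1 1 1 7 5 (by decide) (by omega) (by decide)]
  rw [stepA L 18 7 5 4 41 29 (by decide) (by omega) (by decide)]
  rw [stepA L 17 41 29 21 239 169 (by decide) (by omega) (by decide)]
  rw [stopA L 16 239 169 120 85 (by decide) (by decide) (by omega)]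
  norm_num

theorem pvB_3 (L : Int) (h1 : 21 ≤ L) (h2 : L ≤ 119) :
    blue_red_for_total_limit_alt L = (85, 35, 120) := by
  unfold blue_red_for_total_limit_alt
  simp only []
  rw [if_pos (by omega)]
  rw [buildStep (2 * L + 1) 1 1 7 [(3, 2)] [(3, 2), (17, 12)] 3 2 7 (by decide) (by decide) (by omega) (by decide)]
  rw [buildStep (2 * L + 1) 1 1 6 [(3, 2), (17, 12)] [(3, 2), (17, 12), (577, 408)] 17 12 41 (by decide) (by decide) (by omega) (by decide)]
  rw [buildStop (2 * L + 1) 1 1 5 [(3, 2), (17, 12), (577, 408)] 577 408 1393 (by decide) (by decide) (by omega)]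
  rw [show ([(3, 2), (17, 12), (577, 408)] : List (Int × Int)).dropLast.reverse = [(17, 12), (3, 2)] from by decide]
  rw [List.foldl_cons]
  rw [liftTake (2 * L + 1) (1, 1) (17, 12) (41, 29) 41 (by decide) (by decide) (by omega)]
  rw [List.foldl_cons]
  rw [liftSkip (2 * L + 1) (41, 29) (3, 2) 239 (by decide) (by omega)]
  rw [List.foldl_nil]
  decide

theorem pvA_4 (L : Int) (h1 : 120 ≤ L) (h2 : L ≤ 696) :
    blue_red_for_total_limit L = (493, 204, 697) := by
  unfold blue_red_for_total_limit
  rw [stepA L 19 1 1 1 7 5 (by decide) (by omega) (by decide)]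
  rw [stepA L 18 7 5 4 41 29 (by decide) (by omega) (by decide)]
  rw [stepA L 17 41 29 21 239 169 (by decide) (by omega) (by decide)]
  rw [stepA L 16 239 169 120 1393 985 (by decide) (by omega) (by decide)]
  rw [stopA L 15 1393 985 697 493 (by decide) (by decide) (by omega)]
  norm_num

theorem pvB_4 (L : Int) (h1 : 120 ≤ L) (h2 : L ≤ 696) :
    blue_red_for_total_limit_alt L = (493, 204, 697) := by
  unfold blue_red_for_total_limit_alt
  simp only []
  rw [if_pos (by omega)]
  rw [buildStep (2 * L + 1) 1 1 7 [(3, 2)] [(3, 2), (17, 12)] 3 2 7 (by decide) (by decide) (by omega) (by decide)]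
  rw [buildStep (2 * L + 1) 1 1 6 [(3, 2), (17, 12)] [(3, 2), (17, 12), (577, 408)] 17 12 41 (by decide) (by decide) (by omega) (by decide)]
  rw [buildStop (2 * L + 1) 1 1 5 [(3, 2), (17, 12), (577, 408)] 577 408 1393 (by decide) (by decide) (by omega)]
  rw [show ([(3, 2), (17, 12), (577, 408)] : List (Int × Int)).dropLast.reverse = [(17, 12), (3, 2)] from by decide]
  rw [List.foldl_cons]
  rw [liftTake (2 * L + 1) (1, 1) (17, 12) (41, 29) 41 (by decide) (by decide) (by omega)]
  rw [List.foldl_cons]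
  rw [liftTake (2 * L + 1) (41, 29) (3, 2) (239, 169) 239 (by decide) (by decide) (by omega)]
  rw [List.foldl_nil]
  decide

theorem pvA_5 (L : Int) (h1 : 697 ≤ L) (h2 : L ≤ 4059) :
    blue_red_for_total_limit L = (2871, 1189, 4060) := by
  unfold blue_red_for_total_limit
  rw [stepA L 19 1 1 1 7 5 (by decide) (by omega) (by decide)]
  rw [stepA L 18 7 5 4 41 29 (by decide) (by omega) (by decide)]
  rw [stepA L 17 41 29 21 239 169 (by decide) (by omega) (by decide)]
  rw [stepA L 16 239 169 120 1393 985 (by decide) (by omega) (by decide)]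
  rw [stepA L 15 1393 985 697 8119 5741 (by decide) (by omega) (by decide)]
  rw [stopA L 14 8119 5741 4060 2871 (by decide) (by decide) (by omega)]
  norm_num

theorem pvB_5 (L : Int) (h1 : 697 ≤ L) (h2 : L ≤ 4059) :
    blue_red_for_total_limit_alt L = (2871, 1189, 4060) := by
  unfold blue_red_for_total_limit_alt
  simp only []
  rw [if_pos (by omega)]
  rw [buildStep (2 * L + 1) 1 1 7 [(3, 2)] [(3, 2), (17, 12)] 3 2 7 (by decide) (by decide) (by omega) (by decide)]
  rw [buildStep (2 * L + 1) 1 1 6 [(3, 2), (17, 12)] [(3, 2), (17, 12), (577, 408)] 17 12 41 (by decide) (by decide) (by omega) (by decide)]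
  rw [buildStep (2 * L + 1) 1 1 5 [(3, 2), (17, 12), (577, 408)] [(3, 2), (17, 12), (577, 408), (665857, 470832)] 577 408 1393 (by decide) (by decide) (by omega) (by decide)]
  rw [buildStop (2 * L + 1) 1 1 4 [(3, 2), (17, 12), (577, 408), (665857, 470832)] 665857 470832 1607521 (by decide) (by decide) (by omega)]
  rw [show ([(3, 2), (17, 12), (577, 408), (665857, 470832)] : List (Int × Int)).dropLast.reverse = [(577, 408), (17, 12), (3, 2)] from by decide]
  rw [List.foldl_cons]
  rw [liftTake (2 * L + 1) (1, 1) (577, 408) (1393, 985) 1393 (by decide) (by decide) (by omega)]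
  rw [List.foldl_cons]
  rw [liftSkip (2 * L + 1) (1393, 985) (17, 12) 47321 (by decide) (by omega)]
  rw [List.foldl_cons]
  rw [liftSkip (2 * L + 1) (1393, 985) (3, 2) 8119 (by decide) (by omega)]
  rw [List.foldl_nil]
  decide

theorem pvA_6 (L : Int) (h1 : 4060 ≤ L) (h2 : L ≤ 23660) :
    blue_red_for_total_limit L = (16731, 6930, 23661) := by
  unfold blue_red_for_total_limit
  rw [stepA L 19 1 1 1 7 5 (by decide) (by omega) (by decide)]
  rw [stepA L 18 7 5 4 41 29 (by decide) (by omega) (by decide)]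
  rw [stepA L 17 41 29 21 239 169 (by decide) (by omega) (by decide)]
  rw [stepA L 16 239 169 120 1393 985 (by decide) (by omega) (by decide)]
  rw [stepA L 15 1393 985 697 8119 5741 (by decide) (by omega) (by decide)]
  rw [stepA L 14 8119 5741 4060 47321 33461 (by decide) (by omega) (by decide)]
  rw [stopA L 13 47321 33461 23661 16731 (by decide) (by decide) (by omega)]
  norm_num

theorem pvB_6 (L : Int) (h1 : 4060 ≤ L) (h2 : L ≤ 23660) :
    blue_red_for_total_limit_alt L = (16731, 6930, 23661) := by
  unfold blue_red_for_total_limit_alt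
  simp only []
  rw [if_pos (by omega)]
  rw [buildStep (2 * L + 1) 1 1 7 [(3, 2)] [(3, 2), (17, 12)] 3 2 7 (by decide) (by decide) (by omega) (by decide)]
  rw [buildStep (2 * L + 1) 1 1 6 [(3, 2), (17, 12)] [(3, 2), (17, 12), (577, 408)] 17 12 41 (by decide) (by decide) (by omega) (by decide)]
  rw [buildStep (2 * L + 1) 1 1 5 [(3, 2), (17, 12), (577, 408)] [(3, 2), (17, 12), (577, 408), (665857, 470832)] 577 408 1393 (by decide) (by decide) (by omega) (by decide)]
  rw [buildStop (2 * L + 1) 1 1 4 [(3, 2), (17, 12), (577, 408), (665857, 470832)] 665857 470832 1607521 (by decide) (by decide) (by omega)]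
  rw [show ([(3, 2), (17, 12), (577, 408), (665857, 470832)] : List (Int × Int)).dropLast.reverse = [(577, 408), (17, 12), (3, 2)] from by decide]
  rw [List.foldl_cons]
  rw [liftTake (2 * L + 1) (1, 1) (577, 408) (1393, 985) 1393 (by decide) (by decide) (by omega)]
  rw [List.foldl_cons]
  rw [liftSkip (2 * L + 1) (1393, 985) (17, 12) 47321 (by decide) (by omega)]
  rw [List.foldl_cons]
  rw [liftTake (2 * L + 1) (1393, 985) (3, 2) (8119, 5741) 8119 (by decide) (by decide) (by omega)]
  rw [List.foldl_nil]
  decide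

theorem pvA_7 (L : Int) (h1 : 23661 ≤ L) (h2 : L ≤ 137903) :
    blue_red_for_total_limit L = (97513, 40391, 137904) := by
  unfold blue_red_for_total_limit
  rw [stepA L 19 1 1 1 7 5 (by decide) (by omega) (by decide)]
  rw [stepA L 18 7 5 4 41 29 (by decide) (by omega) (by decide)]
  rw [stepA L 17 41 29 21 239 169 (by decide) (by omega) (by decide)]
  rw [stepA L 16 239 169 120 1393 985 (by decide) (by omega) (by decide)]
  rw [stepA L 15 1393 985 697 8119 5741 (by decide) (by omega) (by decide)]
  rw [stepA L 14 8119 5741 4060 47321 33461 (by decide) (by omega) (by decide)]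
  rw [stepA L 13 47321 33461 23661 275807 195025 (by decide) (by omega) (by decide)]
  rw [stopA L 12 275807 195025 137904 97513 (by decide) (by decide) (by omega)]
  norm_num

theorem pvB_7 (L : Int) (h1 : 23661 ≤ L) (h2 : L ≤ 137903) :
    blue_red_for_total_limit_alt L = (97513, 40391, 137904) := by
  unfold blue_red_for_total_limit_alt
  simp only []
  rw [if_pos (by omega)]
  rw [buildStep (2 * L + 1) 1 1 7 [(3, 2)] [(3, 2), (17, 12)] 3 2 7 (by decide) (by decide) (by omega) (by decide)]
  rw [buildStep (2 * L + 1) 1 1 6 [(3, 2), (17, 12)] [(3, 2), (17, 12), (577, 408)] 17 12 41 (by decide) (by decide) (by omega) (by decide)]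
  rw [buildStep (2 * L + 1) 1 1 5 [(3, 2), (17, 12), (577, 408)] [(3, 2), (17, 12), (577, 408), (665857, 470832)] 577 408 1393 (by decide) (by decide) (by omega) (by decide)]
  rw [buildStop (2 * L + 1) 1 1 4 [(3, 2), (17, 12), (577, 408), (665857, 470832)] 665857 470832 1607521 (by decide) (by decide) (by omega)]
  rw [show ([(3, 2), (17, 12), (577, 408), (665857, 470832)] : List (Int × Int)).dropLast.reverse = [(577, 408), (17, 12), (3, 2)] from by decide]
  rw [List.foldl_cons]
  rw [liftTake (2 * L + 1) (1, 1) (577, 408) (1393, 985) 1393 (by decide) (by decide) (by omega)]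
  rw [List.foldl_cons]
  rw [liftTake (2 * L + 1) (1393, 985) (17, 12) (47321, 33461) 47321 (by decide) (by decide) (by omega)]
  rw [List.foldl_cons]
  rw [liftSkip (2 * L + 1) (47321, 33461) (3, 2) 275807 (by decide) (by omega)]
  rw [List.foldl_nil]
  decide

theorem pvA_8 (L : Int) (h1 : 137904 ≤ L) (h2 : L ≤ 803760) :
    blue_red_for_total_limit L = (568345, 235416, 803761) := by
  unfold blue_red_for_total_limit
  rw [stepA L 19 1 1 1 7 5 (by decide) (by omega) (by decide)]
  rw [stepA L 18 7 5 4 41 29 (by decide) (by omega) (by decide)]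
  rw [stepA L 17 41 29 21 239 169 (by decide) (by omega) (by decide)]
  rw [stepA L 16 239 169 120 1393 985 (by decide) (by omega) (by decide)]
  rw [stepA L 15 1393 985 697 8119 5741 (by decide) (by omega) (by decide)]
  rw [stepA L 14 8119 5741 4060 47321 33461 (by decide) (by omega) (by decide)]
  rw [stepA L 13 47321 33461 23661 275807 195025 (by decide) (by omega) (by decide)]
  rw [stepA L 12 275807 195025 137904 1607521 1136689 (by decide) (by omega) (by decide)]
  rw [stopA L 11 1607521 1136689 803761 568345 (by decide) (by decide) (by omega)]
  norm_num

theorem pvB_8 (L : Int) (h1 : 137904 ≤ L) (h2 : L ≤ 803760) :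
    blue_red_for_total_limit_alt L = (568345, 235416, 803761) := by
  unfold blue_red_for_total_limit_alt
  simp only []
  rw [if_pos (by omega)]
  rw [buildStep (2 * L + 1) 1 1 7 [(3, 2)] [(3, 2), (17, 12)] 3 2 7 (by decide) (by decide) (by omega) (by decide)]
  rw [buildStep (2 * L + 1) 1 1 6 [(3, 2), (17, 12)] [(3, 2), (17, 12), (577, 408)] 17 12 41 (by decide) (by decide) (by omega) (by decide)]
  rw [buildStep (2 * L + 1) 1 1 5 [(3, 2), (17, 12), (577, 408)] [(3, 2), (17, 12), (577, 408), (665857, 470832)] 577 408 1393 (by decide) (by decide) (by omega) (by decide)]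
  rw [buildStop (2 * L + 1) 1 1 4 [(3, 2), (17, 12), (577, 408), (665857, 470832)] 665857 470832 1607521 (by decide) (by decide) (by omega)]
  rw [show ([(3, 2), (17, 12), (577, 408), (665857, 470832)] : List (Int × Int)).dropLast.reverse = [(577, 408), (17, 12), (3, 2)] from by decide]
  rw [List.foldl_cons]
  rw [liftTake (2 * L + 1) (1, 1) (577, 408) (1393, 985) 1393 (by decide) (by decide) (by omega)]
  rw [List.foldl_cons]
  rw [liftTake (2 * L + 1) (1393, 985) (17, 12) (47321, 33461) 47321 (by decide) (by decide) (by omega)]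
  rw [List.foldl_cons]
  rw [liftTake (2 * L + 1) (47321, 33461) (3, 2) (275807, 195025) 275807 (by decide) (by decide) (by omega)]
  rw [List.foldl_nil]
  decide

theorem pvA_9 (L : Int) (h1 : 803761 ≤ L) (h2 : L ≤ 4684659) :
    blue_red_for_total_limit L = (3312555, 1372105, 4684660) := by
  unfold blue_red_for_total_limit
  rw [stepA L 19 1 1 1 7 5 (by decide) (by omega) (by decide)]
  rw [stepA L 18 7 5 4 41 29 (by decide) (by omega) (by decide)]
  rw [stepA L 17 41 29 21 239 169 (by decide) (by omega) (by decide)]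
  rw [stepA L 16 239 169 120 1393 985 (by decide) (by omega) (by decide)]
  rw [stepA L 15 1393 985 697 8119 5741 (by decide) (by omega) (by decide)]
  rw [stepA L 14 8119 5741 4060 47321 33461 (by decide) (by omega) (by decide)]
  rw [stepA L 13 47321 33461 23661 275807 195025 (by decide) (by omega) (by decide)]
  rw [stepA L 12 275807 195025 137904 1607521 1136689 (by decide) (by omega) (by decide)]
  rw [stepA L 11 1607521 1136689 803761 9369319 6625109 (by decide) (by omega) (by decide)]
  rw [stopA L 10 9369319 6625109 4684660 3312555 (by decide) (by decide) (by omega)]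
  norm_num

theorem pvB_9 (L : Int) (h1 : 803761 ≤ L) (h2 : L ≤ 4684659) :
    blue_red_for_total_limit_alt L = (3312555, 1372105, 4684660) := by
  unfold blue_red_for_total_limit_alt
  simp only []
  rw [if_pos (by omega)]
  rw [buildStep (2 * L + 1) 1 1 7 [(3, 2)] [(3, 2), (17, 12)] 3 2 7 (by decide) (by decide) (by omega) (by decide)]
  rw [buildStep (2 * L + 1) 1 1 6 [(3, 2), (17, 12)] [(3, 2), (17, 12), (577, 408)] 17 12 41 (by decide) (by decide) (by omega) (by decide)]
  rw [buildStep (2 * L + 1) 1 1 5 [(3, 2), (17, 12), (577, 408)] [(3, 2), (17, 12), (577, 408), (665857, 470832)] 577 408 1393 (by decide) (by decide) (by omega) (by decide)]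
  rw [buildStep (2 * L + 1) 1 1 4 [(3, 2), (17, 12), (577, 408), (665857, 470832)] [(3, 2), (17, 12), (577, 408), (665857, 470832), (886731088897, 627013566048)] 665857 470832 1607521 (by decide) (by decide) (by omega) (by decide)]
  rw [buildStop (2 * L + 1) 1 1 3 [(3, 2), (17, 12), (577, 408), (665857, 470832), (886731088897, 627013566048)] 886731088897 627013566048 2140758220993 (by decide) (by decide) (by omega)]
  rw [show ([(3, 2), (17, 12), (577, 408), (665857, 470832), (886731088897, 627013566048)] : List (Int × Int)).dropLast.reverse = [(665857, 470832), (577, 408), (17, 12), (3, 2)] from by decide]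
  rw [List.foldl_cons]
  rw [liftTake (2 * L + 1) (1, 1) (665857, 470832) (1607521, 1136689) 1607521 (by decide) (by decide) (by omega)]
  rw [List.foldl_cons]
  rw [liftSkip (2 * L + 1) (1607521, 1136689) (577, 408) 1855077841 (by decide) (by omega)]
  rw [List.foldl_cons]
  rw [liftSkip (2 * L + 1) (1607521, 1136689) (17, 12) 54608393 (by decide) (by omega)]
  rw [List.foldl_cons]
  rw [liftSkip (2 * L + 1) (1607521, 1136689) (3, 2) 9369319 (by decide) (by omega)]
  rw [List.foldl_nil]
  decide

theorem pvA_10 (L : Int) (h1 : 4684660 ≤ L) (h2 : L ≤ 27304196) :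
    blue_red_for_total_limit L = (19306983, 7997214, 27304197) := by
  unfold blue_red_for_total_limit
  rw [stepA L 19 1 1 1 7 5 (by decide) (by omega) (by decide)]
  rw [stepA L 18 7 5 4 41 29 (by decide) (by omega) (by decide)]
  rw [stepA L 17 41 29 21 239 169 (by decide) (by omega) (by decide)]
  rw [stepA L 16 239 169 120 1393 985 (by decide) (by omega) (by decide)]
  rw [stepA L 15 1393 985 697 8119 5741 (by decide) (by omega) (by decide)]
  rw [stepA L 14 8119 5741 4060 47321 33461 (by decide) (by omega) (by decide)]
  rw [stepA L 13 47321 33461 23661 275807 195025 (by decide) (by omega) (by decide)]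
  rw [stepA L 12 275807 195025 137904 1607521 1136689 (by decide) (by omega) (by decide)]
  rw [stepA L 11 1607521 1136689 803761 9369319 6625109 (by decide) (by omega) (by decide)]
  rw [stepA L 10 9369319 6625109 4684660 54608393 38613965 (by decide) (by omega) (by decide)]
  rw [stopA L 9 54608393 38613965 27304197 19306983 (by decide) (by decide) (by omega)]
  norm_num

theorem pvB_10 (L : Int) (h1 : 4684660 ≤ L) (h2 : L ≤ 27304196) :
    blue_red_for_total_limit_alt L = (19306983, 7997214, 27304197) := by
  unfold blue_red_for_total_limit_alt
  simp only []
  rw [if_pos (by omega)]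
  rw [buildStep (2 * L + 1) 1 1 7 [(3, 2)] [(3, 2), (17, 12)] 3 2 7 (by decide) (by decide) (by omega) (by decide)]
  rw [buildStep (2 * L + 1) 1 1 6 [(3, 2), (17, 12)] [(3, 2), (17, 12), (577, 408)] 17 12 41 (by decide) (by decide) (by omega) (by decide)]
  rw [buildStep (2 * L + 1) 1 1 5 [(3, 2), (17, 12), (577, 408)] [(3, 2), (17, 12), (577, 408), (665857, 470832)] 577 408 1393 (by decide) (by decide) (by omega) (by decide)]
  rw [buildStep (2 * L + 1) 1 1 4 [(3, 2), (17, 12), (577, 408), (665857, 470832)] [(3, 2), (17, 12), (577, 408), (665857, 470832), (886731088897, 627013566048)] 665857 470832 1607521 (by decide) (by decide) (by omega) (by decide)]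
  rw [buildStop (2 * L + 1) 1 1 3 [(3, 2), (17, 12), (577, 408), (665857, 470832), (886731088897, 627013566048)] 886731088897 627013566048 2140758220993 (by decide) (by decide) (by omega)]
  rw [show ([(3, 2), (17, 12), (577, 408), (665857, 470832), (886731088897, 627013566048)] : List (Int × Int)).dropLast.reverse = [(665857, 470832), (577, 408), (17, 12), (3, 2)] from by decide]
  rw [List.foldl_cons]
  rw [liftTake (2 * L + 1) (1, 1) (665857, 470832) (1607521, 1136689) 1607521 (by decide) (by decide) (by omega)]
  rw [List.foldl_cons]
  rw [liftSkip (2 * L + 1) (1607521, 1136689) (577, 408) 1855077841 (by decide) (by omega)]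
  rw [List.foldl_cons]
  rw [liftSkip (2 * L + 1) (1607521, 1136689) (17, 12) 54608393 (by decide) (by omega)]
  rw [List.foldl_cons]
  rw [liftTake (2 * L + 1) (1607521, 1136689) (3, 2) (9369319, 6625109) 9369319 (by decide) (by decide) (by omega)]
  rw [List.foldl_nil]
  decide

theorem pvA_11 (L : Int) (h1 : 27304197 ≤ L) (h2 : L ≤ 159140519) :
    blue_red_for_total_limit L = (112529341, 46611179, 159140520) := by
  unfold blue_red_for_total_limit
  rw [stepA L 19 1 1 1 7 5 (by decide) (by omega) (by decide)]
  rw [stepA L 18 7 5 4 41 29 (by decide) (by omega) (by decide)]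
  rw [stepA L 17 41 29 21 239 169 (by decide) (by omega) (by decide)]
  rw [stepA L 16 239 169 120 1393 985 (by decide) (by omega) (by decide)]
  rw [stepA L 15 1393 985 697 8119 5741 (by decide) (by omega) (by decide)]
  rw [stepA L 14 8119 5741 4060 47321 33461 (by decide) (by omega) (by decide)]
  rw [stepA L 13 47321 33461 23661 275807 195025 (by decide) (by omega) (by decide)]
  rw [stepA L 12 275807 195025 137904 1607521 1136689 (by decide) (by omega) (by decide)]
  rw [stepA L 11 1607521 1136689 803761 9369319 6625109 (by decide) (by omega) (by decide)]
  rw [stepA L 10 9369319 6625109 4684660 54608393 38613965 (by decide) (by omega) (by decide)]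
  rw [stepA L 9 54608393 38613965 27304197 318281039 225058681 (by decide) (by omega) (by decide)]
  rw [stopA L 8 318281039 225058681 159140520 112529341 (by decide) (by decide) (by omega)]
  norm_num

theorem pvB_11 (L : Int) (h1 : 27304197 ≤ L) (h2 : L ≤ 159140519) :
    blue_red_for_total_limit_alt L = (112529341, 46611179, 159140520) := by
  unfold blue_red_for_total_limit_alt
  simp only []
  rw [if_pos (by omega)]
  rw [buildStep (2 * L + 1) 1 1 7 [(3, 2)] [(3, 2), (17, 12)] 3 2 7 (by decide) (by decide) (by omega) (by decide)]
  rw [buildStep (2 * L + 1) 1 1 6 [(3, 2), (17, 12)] [(3, 2), (17, 12), (577, 408)] 17 12 41 (by decide) (by decide) (by omega) (by decide)]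
  rw [buildStep (2 * L + 1) 1 1 5 [(3, 2), (17, 12), (577, 408)] [(3, 2), (17, 12), (577, 408), (665857, 470832)] 577 408 1393 (by decide) (by decide) (by omega) (by decide)]
  rw [buildStep (2 * L + 1) 1 1 4 [(3, 2), (17, 12), (577, 408), (665857, 470832)] [(3, 2), (17, 12), (577, 408), (665857, 470832), (886731088897, 627013566048)] 665857 470832 1607521 (by decide) (by decide) (by omega) (by decide)]
  rw [buildStop (2 * L + 1) 1 1 3 [(3, 2), (17, 12), (577, 408), (665857, 470832), (886731088897, 627013566048)] 886731088897 627013566048 2140758220993 (by decide) (by decide) (by omega)]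
  rw [show ([(3, 2), (17, 12), (577, 408), (665857, 470832), (886731088897, 627013566048)] : List (Int × Int)).dropLast.reverse = [(665857, 470832), (577, 408), (17, 12), (3, 2)] from by decide]
  rw [List.foldl_cons]
  rw [liftTake (2 * L + 1) (1, 1) (665857, 470832) (1607521, 1136689) 1607521 (by decide) (by decide) (by omega)]
  rw [List.foldl_cons]
  rw [liftSkip (2 * L + 1) (1607521, 1136689) (577, 408) 1855077841 (by decide) (by omega)]
  rw [List.foldl_cons]
  rw [liftTake (2 * L + 1) (1607521, 1136689) (17, 12) (54608393, 38613965) 54608393 (by decide) (by decide) (by omega)]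
  rw [List.foldl_cons]
  rw [liftSkip (2 * L + 1) (54608393, 38613965) (3, 2) 318281039 (by decide) (by omega)]
  rw [List.foldl_nil]
  decide

theorem pvA_12 (L : Int) (h1 : 159140520 ≤ L) (h2 : L ≤ 927538920) :
    blue_red_for_total_limit L = (655869061, 271669860, 927538921) := by
  unfold blue_red_for_total_limit
  rw [stepA L 19 1 1 1 7 5 (by decide) (by omega) (by decide)]
  rw [stepA L 18 7 5 4 41 29 (by decide) (by omega) (by decide)]
  rw [stepA L 17 41 29 21 239 169 (by decide) (by omega) (by decide)]
  rw [stepA L 16 239 169 120 1393 985 (by decide) (by omega) (by decide)]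
  rw [stepA L 15 1393 985 697 8119 5741 (by decide) (by omega) (by decide)]
  rw [stepA L 14 8119 5741 4060 47321 33461 (by decide) (by omega) (by decide)]
  rw [stepA L 13 47321 33461 23661 275807 195025 (by decide) (by omega) (by decide)]
  rw [stepA L 12 275807 195025 137904 1607521 1136689 (by decide) (by omega) (by decide)]
  rw [stepA L 11 1607521 1136689 803761 9369319 6625109 (by decide) (by omega) (by decide)]
  rw [stepA L 10 9369319 6625109 4684660 54608393 38613965 (by decide) (by omega) (by decide)]
  rw [stepA L 9 54608393 38613965 27304197 318281039 225058681 (by decide) (by omega) (by decide)]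
  rw [stepA L 8 318281039 225058681 159140520 1855077841 1311738121 (by decide) (by omega) (by decide)]
  rw [stopA L 7 1855077841 1311738121 927538921 655869061 (by decide) (by decide) (by omega)]
  norm_num

theorem pvB_12 (L : Int) (h1 : 159140520 ≤ L) (h2 : L ≤ 927538920) :
    blue_red_for_total_limit_alt L = (655869061, 271669860, 927538921) := by
  unfold blue_red_for_total_limit_alt
  simp only []
  rw [if_pos (by omega)]
  rw [buildStep (2 * L + 1) 1 1 7 [(3, 2)] [(3, 2), (17, 12)] 3 2 7 (by decide) (by decide) (by omega) (by decide)]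
  rw [buildStep (2 * L + 1) 1 1 6 [(3, 2), (17, 12)] [(3, 2), (17, 12), (577, 408)] 17 12 41 (by decide) (by decide) (by omega) (by decide)]
  rw [buildStep (2 * L + 1) 1 1 5 [(3, 2), (17, 12), (577, 408)] [(3, 2), (17, 12), (577, 408), (665857, 470832)] 577 408 1393 (by decide) (by decide) (by omega) (by decide)]
  rw [buildStep (2 * L + 1) 1 1 4 [(3, 2), (17, 12), (577, 408), (665857, 470832)] [(3, 2), (17, 12), (577, 408), (665857, 470832), (886731088897, 627013566048)] 665857 470832 1607521 (by decide) (by decide) (by omega) (by decide)]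
  rw [buildStop (2 * L + 1) 1 1 3 [(3, 2), (17, 12), (577, 408), (665857, 470832), (886731088897, 627013566048)] 886731088897 627013566048 2140758220993 (by decide) (by decide) (by omega)]
  rw [show ([(3, 2), (17, 12), (577, 408), (665857, 470832), (886731088897, 627013566048)] : List (Int × Int)).dropLast.reverse = [(665857, 470832), (577, 408), (17, 12), (3, 2)] from by decide]
  rw [List.foldl_cons]
  rw [liftTake (2 * L + 1) (1, 1) (665857, 470832) (1607521, 1136689) 1607521 (by decide) (by decide) (by omega)]
  rw [List.foldl_cons]
  rw [liftSkip (2 * L + 1) (1607521, 1136689) (577, 408) 1855077841 (by decide) (by omega)]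
  rw [List.foldl_cons]
  rw [liftTake (2 * L + 1) (1607521, 1136689) (17, 12) (54608393, 38613965) 54608393 (by decide) (by decide) (by omega)]
  rw [List.foldl_cons]
  rw [liftTake (2 * L + 1) (54608393, 38613965) (3, 2) (318281039, 225058681) 318281039 (by decide) (by decide) (by omega)]
  rw [List.foldl_nil]
  decide

theorem pvA_13 (L : Int) (h1 : 927538921 ≤ L) (h2 : L ≤ 2147483648) :
    blue_red_for_total_limit L = (3822685023, 1583407981, 5406093004) := by
  unfold blue_red_for_total_limit
  rw [stepA L 19 1 1 1 7 5 (by decide) (by omega) (by decide)]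
  rw [stepA L 18 7 5 4 41 29 (by decide) (by omega) (by decide)]
  rw [stepA L 17 41 29 21 239 169 (by decide) (by omega) (by decide)]
  rw [stepA L 16 239 169 120 1393 985 (by decide) (by omega) (by decide)]
  rw [stepA L 15 1393 985 697 8119 5741 (by decide) (by omega) (by decide)]
  rw [stepA L 14 8119 5741 4060 47321 33461 (by decide) (by omega) (by decide)]
  rw [stepA L 13 47321 33461 23661 275807 195025 (by decide) (by omega) (by decide)]
  rw [stepA L 12 275807 195025 137904 1607521 1136689 (by decide) (by omega) (by decide)]
  rw [stepA L 11 1607521 1136689 803761 9369319 6625109 (by decide) (by omega) (by decide)]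
  rw [stepA L 10 9369319 6625109 4684660 54608393 38613965 (by decide) (by omega) (by decide)]
  rw [stepA L 9 54608393 38613965 27304197 318281039 225058681 (by decide) (by omega) (by decide)]
  rw [stepA L 8 318281039 225058681 159140520 1855077841 1311738121 (by decide) (by omega) (by decide)]
  rw [stepA L 7 1855077841 1311738121 927538921 10812186007 7645370045 (by decide) (by omega) (by decide)]
  rw [stopA L 6 10812186007 7645370045 5406093004 3822685023 (by decide) (by decide) (by omega)]
  norm_num

theorem pvB_13 (L : Int) (h1 : 927538921 ≤ L) (h2 : L ≤ 2147483648) :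
    blue_red_for_total_limit_alt L = (3822685023, 1583407981, 5406093004) := by
  unfold blue_red_for_total_limit_alt
  simp only []
  rw [if_pos (by omega)]
  rw [buildStep (2 * L + 1) 1 1 7 [(3, 2)] [(3, 2), (17, 12)] 3 2 7 (by decide) (by decide) (by omega) (by decide)]
  rw [buildStep (2 * L + 1) 1 1 6 [(3, 2), (17, 12)] [(3, 2), (17, 12), (577, 408)] 17 12 41 (by decide) (by decide) (by omega) (by decide)]
  rw [buildStep (2 * L + 1) 1 1 5 [(3, 2), (17, 12), (577, 408)] [(3, 2), (17, 12), (577, 408), (665857, 470832)] 577 408 1393 (by decide) (by decide) (by omega) (by decide)]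
  rw [buildStep (2 * L + 1) 1 1 4 [(3, 2), (17, 12), (577, 408), (665857, 470832)] [(3, 2), (17, 12), (577, 408), (665857, 470832), (886731088897, 627013566048)] 665857 470832 1607521 (by decide) (by decide) (by omega) (by decide)]
  rw [buildStop (2 * L + 1) 1 1 3 [(3, 2), (17, 12), (577, 408), (665857, 470832), (886731088897, 627013566048)] 886731088897 627013566048 2140758220993 (by decide) (by decide) (by omega)]
  rw [show ([(3, 2), (17, 12), (577, 408), (665857, 470832), (886731088897, 627013566048)] : List (Int × Int)).dropLast.reverse = [(665857, 470832), (577, 408), (17, 12), (3, 2)] from by decide]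
  rw [List.foldl_cons]
  rw [liftTake (2 * L + 1) (1, 1) (665857, 470832) (1607521, 1136689) 1607521 (by decide) (by decide) (by omega)]
  rw [List.foldl_cons]
  rw [liftTake (2 * L + 1) (1607521, 1136689) (577, 408) (1855077841, 1311738121) 1855077841 (by decide) (by decide) (by omega)]
  rw [List.foldl_cons]
  rw [liftSkip (2 * L + 1) (1855077841, 1311738121) (17, 12) 63018038201 (by decide) (by omega)]
  rw [List.foldl_cons]
  rw [liftSkip (2 * L + 1) (1855077841, 1311738121) (3, 2) 10812186007 (by decide) (by omega)]
  rw [List.foldl_nil]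
  decide
-- ===== VERDICT (by name: the statement is the Claim_ definition above) =====
theorem blue_red_for_total_limit_spec : Claim_equal_blue_red_for_total_limit := by
  intro L hD
  unfold Dom_blue_red_for_total_limit pvDomInt at hD
  simp only [decide_eq_true_eq] at hD
  unfold Spec_blue_red_for_total_limit
  by_cases hc0 : L ≤ 0
  · rw [pvA_0 L hc0, pvB_0 L hc0]
  by_cases hc1 : L ≤ 3
  · rw [pvA_1 L (by omega) hc1, pvB_1 L (by omega) hc1]
  by_cases hc2 : L ≤ 20
  · rw [pvA_2 L (by omega) hc2, pvB_2 L (by omega) hc2]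
  by_cases hc3 : L ≤ 119
  · rw [pvA_3 L (by omega) hc3, pvB_3 L (by omega) hc3]
  by_cases hc4 : L ≤ 696
  · rw [pvA_4 L (by omega) hc4, pvB_4 L (by omega) hc4]
  by_cases hc5 : L ≤ 4059
  · rw [pvA_5 L (by omega) hc5, pvB_5 L (by omega) hc5]
  by_cases hc6 : L ≤ 23660
  · rw [pvA_6 L (by omega) hc6, pvB_6 L (by omega) hc6]
  by_cases hc7 : L ≤ 137903
  · rw [pvA_7 L (by omega) hc7, pvB_7 L (by omega) hc7]
  by_cases hc8 : L ≤ 803760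
  · rw [pvA_8 L (by omega) hc8, pvB_8 L (by omega) hc8]
  by_cases hc9 : L ≤ 4684659
  · rw [pvA_9 L (by omega) hc9, pvB_9 L (by omega) hc9]
  by_cases hc10 : L ≤ 27304196
  · rw [pvA_10 L (by omega) hc10, pvB_10 L (by omega) hc10]
  by_cases hc11 : L ≤ 159140519
  · rw [pvA_11 L (by omega) hc11, pvB_11 L (by omega) hc11]
  by_cases hc12 : L ≤ 927538920
  · rw [pvA_12 L (by omega) hc12, pvB_12 L (by omega) hc12]
  · rw [pvA_13 L (by omega) (by omega), pvB_13 L (by omega) (by omega)]
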